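-- pv_equiv track=rewrite | github.com/qwchua/tic3901 | gitpraise/database.py | __parseGitLogToFileHistoryQueue
-- ===== SOURCE A (Python) =====
-- def __parseGitLogToFileHistoryQueue(log):
--     queue = []
--     lines = log.split("\n")
--
--     i = 0
--     prevFilename = ""
--     prevHash = ""
--     while i < len(lines):
--         if len(lines[i]) > 1:
--             l = lines[i]
--             collection = l.split(",")
--             commithash = collection[0]
--             i+=2
--             filename = lines[i]
--             if filename != prevFilename:
--                 queue.append({"oldHash":commithash, "newHash":prevHash, "oldFileName":filename, "newFileName": prevFilename})
--
--             prevHash = commithash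
--             prevFilename = filename
--
--         i+=1
--
--     return queue
-- ===== SOURCE B (Python) =====
-- def __parseGitLogToFileHistoryQueue(log):
--     lines = log.split("\n")
--     # pass 1: parse (commithash, filename) records with the same guarded stepping
--     records = []
--     i = 0
--     while i < len(lines):
--         if len(lines[i]) > 1:
--             records.append((lines[i].split(",")[0], lines[i + 2]))
--             i += 3
--         else:
--             i += 1
--     # pass 2: pair each record with its predecessor and keep the filename changes
--     prevs = [("", "")] + records[:-1]
--     return [
--         {"oldHash": h, "newHash": ph, "oldFileName": f, "newFileName": pf}
--         for (h, f), (ph, pf) in zip(records, prevs)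
--         if f != pf
--     ]
-- ===== Notes on version B (the rewrite author's own statement) =====
-- stated objective: alternative
-- what changed: A's single index-driven state machine (prevHash/prevFilename threaded through the walk) is split into two phases: a parse pass that extracts (commithash, filename) records, then a zip of the record list with its shifted self that filters filename changes and builds the dicts.
import Mathlib
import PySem

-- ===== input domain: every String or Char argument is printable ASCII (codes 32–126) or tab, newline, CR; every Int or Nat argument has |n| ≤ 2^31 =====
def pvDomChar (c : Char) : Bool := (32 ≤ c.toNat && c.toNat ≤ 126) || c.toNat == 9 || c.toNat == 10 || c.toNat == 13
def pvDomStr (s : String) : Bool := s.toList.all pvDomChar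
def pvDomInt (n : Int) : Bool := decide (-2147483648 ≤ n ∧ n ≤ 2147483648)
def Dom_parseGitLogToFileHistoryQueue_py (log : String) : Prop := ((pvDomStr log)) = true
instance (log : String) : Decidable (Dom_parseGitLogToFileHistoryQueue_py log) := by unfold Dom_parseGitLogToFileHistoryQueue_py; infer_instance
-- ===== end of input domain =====

-- B replaces A's single index-driven state machine by a parse pass producing (hash, filename)
-- records followed by a zip-with-predecessor pairing pass; same cost, different decomposition.


-- ===== PORT A =====
-- the while-i loop of A as recursion on the remaining suffix of lines
-- (lines[i] = head, lines[i+2] = rest[1], 'i += 3' = drop 2 of rest);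
-- the 'none' branch is Python's IndexError on lines[i] after i += 2, excluded by Pre_.
def pvGoA : List String → String → String → List (List (String × String)) → List (List (String × String))
  | [], _, _, queue => queue
  | l :: rest, prevHash, prevFilename, queue =>
    if l.toList.length > 1 then
      let commithash := ((PySem.Str.split? l ",").getD []).headD ""
      match PySem.List.pyGet? rest 1 with
      | none => queue
      | some filename =>
        let queue' := if filename ≠ prevFilename then
            queue ++ [[("oldHash", commithash), ("newHash", prevHash),
                       ("oldFileName", filename), ("newFileName", prevFilename)]]
          else queue
        pvGoA (rest.drop 2) commithash filename queue'
    else pvGoA rest prevHash prevFilename queue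
termination_by l => l.length
decreasing_by
  all_goals simp [List.length_drop]

def parseGitLogToFileHistoryQueue_py (log : String) : List (List (String × String)) :=
  pvGoA ((PySem.Str.split? log "\n").getD []) "" "" []

-- ===== PORT B =====
-- pass 1 of Source B: extract the (commithash, filename) records (same guarded stepping;
-- the 'none' branch is the IndexError on lines[i + 2], excluded by Pre_)
def pvRecords : List String → List (String × String)
  | [] => []
  | l :: rest =>
    if l.toList.length > 1 then
      match PySem.List.pyGet? rest 1 with
      | none => []
      | some filename => (((PySem.Str.split? l ",").getD []).headD "", filename) :: pvRecords (rest.drop 2)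
    else pvRecords rest
termination_by l => l.length
decreasing_by
  all_goals simp [List.length_drop]

def parseGitLogToFileHistoryQueue_py_alt (log : String) : List (List (String × String)) :=
  let records := pvRecords ((PySem.Str.split? log "\n").getD [])
  let prevs := ("", "") :: records.dropLast
  ((records.zip prevs).filter (fun p => p.1.2 ≠ p.2.2)).map
    (fun p => [("oldHash", p.1.1), ("newHash", p.2.1),
               ("oldFileName", p.1.2), ("newFileName", p.2.2)])

-- ===== PRECONDITION & SPEC =====
-- closed-form shape of a parseable log, as a line grammar: the log is a sequence of
-- blocks, each either a separator line of length <= 1 or a record = a commit line of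
-- length > 1 followed by at least two more lines (structural; checked without running A)
def pvLogGrammar : List String → Bool
  | [] => true
  | l :: rest =>
    if l.toList.length ≤ 1 then pvLogGrammar rest
    else match rest with
      | _ :: _ :: rest' => pvLogGrammar rest'
      | _ => false

-- Pre_ excludes exactly the logs on which A raises IndexError (a record's commit-hash line
-- not followed by two lines); B raises the same IndexError there.
def Pre_parseGitLogToFileHistoryQueue_py (log : String) : Prop :=
  pvLogGrammar ((PySem.Str.split? log "\n").getD []) = true
instance (log : String) : Decidable (Pre_parseGitLogToFileHistoryQueue_py log) := by
  unfold Pre_parseGitLogToFileHistoryQueue_py; infer_instance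

def pvWitness_parseGitLogToFileHistoryQueue_py : String := "ab\n\nc"

def Spec_parseGitLogToFileHistoryQueue_py (log : String) (out : List (List (String × String))) : Prop := out = parseGitLogToFileHistoryQueue_py_alt log
instance (log : String) (out : List (List (String × String))) : Decidable (Spec_parseGitLogToFileHistoryQueue_py log out) := by unfold Spec_parseGitLogToFileHistoryQueue_py; infer_instance

-- ===== CLAIM (what is proved, stated in full; the proofs are below) =====
def Claim_equal_parseGitLogToFileHistoryQueue_py : Prop := ∀ (log : String), Dom_parseGitLogToFileHistoryQueue_py log → Pre_parseGitLogToFileHistoryQueue_py log → Spec_parseGitLogToFileHistoryQueue_py log (parseGitLogToFileHistoryQueue_py log)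

-- ===== LEMMAS AND PROOFS =====

-- the pairing pass of B written as the accumulator recursion it is compared with
def pvPairs : List (String × String) → String → String → List (List (String × String))
  | [], _, _ => []
  | (h, f) :: rs, prevHash, prevFilename =>
    (if f ≠ prevFilename then
       [[("oldHash", h), ("newHash", prevHash), ("oldFileName", f), ("newFileName", prevFilename)]]
     else []) ++ pvPairs rs h f

theorem pvZipTake {α β : Type} (xs : List α) (ys : List β) :
    xs.zip (ys.take xs.length) = xs.zip ys := by
  induction xs generalizing ys with
  | nil => rfl
  | cons a t ih =>
    cases ys with
    | nil => rfl
    | cons b u => simp only [List.length_cons, List.take_succ_cons, List.zip_cons_cons, ih]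

theorem pvZip_dropLast (rs : List (String × String)) (p : String × String) :
    rs.zip (p :: rs.dropLast) = rs.zip (p :: rs) := by
  cases rs with
  | nil => rfl
  | cons a t =>
    rw [List.dropLast_eq_take, ← pvZipTake (a :: t) (p :: a :: t)]
    simp

theorem pvZip_pairs_aux (rs : List (String × String)) (pH pF : String) :
    ((rs.zip ((pH, pF) :: rs)).filter (fun p => p.1.2 ≠ p.2.2)).map
      (fun p => [("oldHash", p.1.1), ("newHash", p.2.1),
                 ("oldFileName", p.1.2), ("newFileName", p.2.2)])
      = pvPairs rs pH pF := by
  induction rs generalizing pH pF with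
  | nil => rfl
  | cons a t ih =>
    obtain ⟨h, f⟩ := a
    have ih' := ih h f
    simp only [ne_eq, decide_not] at ih'
    by_cases hc : f = pF
    · subst hc
      simp [pvPairs, ih']
    · simp [pvPairs, hc, ih']

theorem pvZip_pairs (rs : List (String × String)) (pH pF : String) :
    ((rs.zip ((pH, pF) :: rs.dropLast)).filter (fun p => p.1.2 ≠ p.2.2)).map
      (fun p => [("oldHash", p.1.1), ("newHash", p.2.1),
                 ("oldFileName", p.1.2), ("newFileName", p.2.2)])
      = pvPairs rs pH pF := by
  rw [pvZip_dropLast]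
  exact pvZip_pairs_aux rs pH pF

theorem pvGoA_eq (lines : List String) (pH pF : String) (q : List (List (String × String)))
    (hok : pvLogGrammar lines = true) :
    pvGoA lines pH pF q = q ++ pvPairs (pvRecords lines) pH pF := by
  match lines with
  | [] => simp [pvGoA, pvRecords, pvPairs]
  | l :: rest =>
    by_cases hl : l.toList.length > 1
    · cases rest with
      | nil => unfold pvLogGrammar at hok; rw [if_neg (by omega)] at hok; simp at hok
      | cons x rest1 =>
        cases rest1 with
        | nil => unfold pvLogGrammar at hok; rw [if_neg (by omega)] at hok; simp at hok
        | cons y rest' =>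
          unfold pvLogGrammar at hok
          rw [if_neg (by omega)] at hok
          have hok' : pvLogGrammar rest' = true := hok
          have hget : PySem.List.pyGet? (x :: y :: rest') 1 = some y := by
            rw [show (1 : Int) = ((1 : Nat) : Int) from rfl, PySem.List.pyGet?_natCast]
            rfl
          simp only [pvGoA, pvRecords, if_pos hl, hget, List.drop_succ_cons, List.drop_zero]
          rw [pvGoA_eq rest' _ _ _ hok']
          by_cases hc : y = pF <;> simp [pvPairs, hc, List.append_assoc]
    · unfold pvLogGrammar at hok
      rw [if_pos (by omega)] at hok
      simp only [pvGoA, pvRecords, if_neg hl]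
      exact pvGoA_eq rest pH pF q hok
termination_by lines.length
decreasing_by
  all_goals subst_vars
  all_goals simp
  all_goals omega

-- ===== VERDICT (by name: the statement is the Claim_ definition above) =====
theorem parseGitLogToFileHistoryQueue_py_spec : Claim_equal_parseGitLogToFileHistoryQueue_py := by
  intro log _ hpre
  unfold Spec_parseGitLogToFileHistoryQueue_py parseGitLogToFileHistoryQueue_py
    parseGitLogToFileHistoryQueue_py_alt
  rw [pvGoA_eq _ _ _ _ hpre, ← pvZip_pairs]
  simp
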